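-- pv_equiv track=rewrite | github.com/ja-vpaw/python-stepik-course-2 | lesson1/lesson1_6_step7_with_input.py | get_anchestors
-- ===== SOURCE A (Python) =====
-- def get_anchestors(inst=None, mro=None, anc_set=None):
--     if inst not in mro.keys():
--         pass
--     else:
--         try:
--             if mro[inst] is None:
--                 pass
--             elif isinstance(mro[inst], list):
--                 for _ in mro[inst]:
--                     anc_set.add(_)
--                 else:
--                     for i in mro[inst]:
--                         if mro[i] is not None:
--                             for v in mro[i]:
--                                 get_anchestors(inst=i, mro=mro, anc_set=anc_set)
--         except KeyError:
--             pass
--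
--     return anc_set
-- ===== SOURCE B (Python) =====
-- def get_anchestors(inst=None, mro=None, anc_set=None):
--     stack = [inst]
--     visited = set()
--     while stack:
--         cls = stack.pop()
--         if cls in visited:
--             continue
--         visited.add(cls)
--         parents = mro.get(cls)
--         if parents is None:
--             continue
--         anc_set.update(parents)
--         stack.extend(reversed(parents))
--     return anc_set
-- ===== Notes on version B (the rewrite author's own statement) =====
-- stated objective: alternative
-- what changed: A's unmemoized recursion (which repeats the identical recursive call len(mro[i]) times and re-explores an ancestor once per path to it) is replaced by an iterative stack-based DFS with a visited set that expands each class at most once; Pre_ excludes incomplete tables whose reachable part mentions a class with no mro entry (an unspecified corner: A stops expanding the remaining siblings at the KeyError, B skips the unknown name) and tables with a cycle reachable from inst (A exceeds the recursion limit there once nothing cuts the exploration first).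
-- outside the precondition, e.g. on get_anchestors('a', {'a': ['m', 'b'], 'b': ['c']}, set()): A returns {'b', 'm'}, B returns {'b', 'm', 'c'}
import Mathlib
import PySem

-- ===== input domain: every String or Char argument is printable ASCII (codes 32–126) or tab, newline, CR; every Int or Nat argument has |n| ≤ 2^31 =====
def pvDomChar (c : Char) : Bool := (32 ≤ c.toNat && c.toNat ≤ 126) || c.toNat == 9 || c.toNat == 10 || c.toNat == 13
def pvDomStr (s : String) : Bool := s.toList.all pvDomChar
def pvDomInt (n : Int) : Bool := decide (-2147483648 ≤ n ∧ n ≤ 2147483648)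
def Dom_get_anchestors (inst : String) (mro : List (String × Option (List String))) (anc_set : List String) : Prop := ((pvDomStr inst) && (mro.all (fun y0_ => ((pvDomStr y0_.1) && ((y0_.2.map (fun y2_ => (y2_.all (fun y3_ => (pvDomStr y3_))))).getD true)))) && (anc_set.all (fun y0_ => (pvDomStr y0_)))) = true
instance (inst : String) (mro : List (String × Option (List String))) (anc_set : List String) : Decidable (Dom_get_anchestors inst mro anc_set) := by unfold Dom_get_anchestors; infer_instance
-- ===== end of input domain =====

-- B replaces A's unmemoized nested recursion by an iterative stack-based DFS with a visited set,
-- expanding each class at most once; both Pythons mutate anc_set in place, the claim is about the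
-- returned value.

-- dict lookup on the association list (Python dict: first binding wins per the type convention)
def dget (d : List (String × Option (List String))) (k : String) : Option (Option (List String)) :=
  List.lookup k d

-- ===== PORT A =====
-- the 'for i in mro[inst]' loop of A: KeyError on a missing parent aborts the loop (the except
-- returns anc_set); 'for v in mro[i]' repeats the identical recursive call len(mro[i]) times, as in A.
def pvLoopA (d : List (String × Option (List String))) (rec : String → List String → List String) :
    List String → List String → List String
  | [], s => s
  | i :: rest, s =>
    match dget d i with
    | none => s
    | some none => pvLoopA d rec rest s
    | some (some vs) => pvLoopA d rec rest (vs.foldl (fun a _ => rec i a) s)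

-- A's body; the fuel is only a termination guard (A's recursion depth is < pvFuel on every input
-- satisfying Pre_get_anchestors)
def pvGoA (d : List (String × Option (List String))) : Nat → String → List String → List String
  | 0, _, s => s
  | f + 1, x, s =>
    match dget d x with
    | none => s                -- inst not in mro.keys()
    | some none => s           -- mro[inst] is None
    | some (some ps) =>
        pvLoopA d (pvGoA d f) ps (ps.foldl PySem.Set.add s)   -- first loop: anc_set.add(_), then the for-else loop

def pvSize (d : List (String × Option (List String))) : Nat :=
  d.foldr (fun p a => 1 + (match p.2 with | some l => l.length | none => 0) + a) 0

def pvFuel (d : List (String × Option (List String))) : Nat := 1 + pvSize d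

def get_anchestors (inst : String) (mro : List (String × Option (List String))) (anc_set : List String) : List String :=
  pvGoA mro (pvFuel mro) inst anc_set

-- ===== PORT B =====
-- helpers the termination measure of B's loop needs
def pAllP (d : List (String × Option (List String))) : List String :=
  d.foldr (fun p acc => (match p.2 with | some l => l | none => []) ++ acc) []

theorem pv_dget_mem (d : List (String × Option (List String))) (k : String) (v : Option (List String))
    (h : dget d k = some v) : (k, v) ∈ d := by
  induction d with
  | nil => simp [dget, List.lookup] at h
  | cons p t ih =>
      obtain ⟨a, b⟩ := p
      by_cases hak : a = k
      · subst hak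
        simp [dget, List.lookup] at h
        simp [h]
      · have hk : (k == a) = false := beq_eq_false_iff_ne.mpr (fun h2 => hak h2.symm)
        simp only [dget, List.lookup, hk] at h
        exact List.mem_cons_of_mem _ (ih h)

theorem pv_mem_pAllP (d : List (String × Option (List String))) (k : String) (l : List String)
    (h : (k, some l) ∈ d) : ∀ j ∈ l, j ∈ pAllP d := by
  induction d with
  | nil => simp at h
  | cons p t ih =>
      intro j hj
      rcases List.mem_cons.mp h with h1 | h2
      · subst h1
        simp [pAllP, hj]
      · simp only [pAllP, List.foldr_cons, List.mem_append]
        right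
        exact ih h2 j hj

theorem pv_listlen_le (d : List (String × Option (List String))) (k : String) (l : List String)
    (h : (k, some l) ∈ d) : l.length ≤ (pAllP d).length := by
  induction d with
  | nil => simp at h
  | cons p t ih =>
      rcases List.mem_cons.mp h with h1 | h2
      · subst h1
        have h1 : pAllP ((k, some l) :: t) = l ++ pAllP t := rfl
        rw [h1, List.length_append]; omega
      · have := ih h2
        rcases p with ⟨a, b⟩
        rcases b with _ | l2
        · have h1 : pAllP ((a, none) :: t) = pAllP t := rfl
          rw [h1]; omega
        · have h1 : pAllP ((a, some l2) :: t) = l2 ++ pAllP t := rfl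
          rw [h1, List.length_append]; omega

theorem pvB_diff_eq (d : List (String × Option (List String))) (c : String) (rest vis : List String)
    (hc : c ∈ vis) :
    ((rest ++ pAllP d).toFinset \ vis.toFinset) = (((c :: rest) ++ pAllP d).toFinset \ vis.toFinset) := by
  ext y
  simp only [Finset.mem_sdiff, List.mem_toFinset, List.mem_append, List.mem_cons]
  constructor
  · rintro ⟨h1, h2⟩; exact ⟨by tauto, h2⟩
  · rintro ⟨h1, h2⟩
    refine ⟨?_, h2⟩
    rcases h1 with (rfl | h) | h
    · exact absurd hc h2
    · tauto
    · tauto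

theorem pvB_diff_subset (d : List (String × Option (List String))) (c : String)
    (rest ext vis : List String) (hext : ∀ e ∈ ext, e ∈ pAllP d) :
    (((ext ++ rest) ++ pAllP d).toFinset \ (PySem.Set.add vis c).toFinset) ⊆
      (((c :: rest) ++ pAllP d).toFinset \ vis.toFinset) := by
  intro y hy
  simp only [Finset.mem_sdiff, List.mem_toFinset, List.mem_append, List.mem_cons,
    PySem.Set.mem_add, not_or] at hy ⊢
  obtain ⟨h1, h2, h3⟩ := hy
  refine ⟨?_, h2⟩
  rcases h1 with (h | h) | h
  · exact Or.inr (hext y h)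
  · tauto
  · tauto

theorem pvB_card_lt (d : List (String × Option (List String))) (c : String)
    (rest ext vis : List String) (hc : c ∉ vis) (hext : ∀ e ∈ ext, e ∈ pAllP d) :
    (((ext ++ rest) ++ pAllP d).toFinset \ (PySem.Set.add vis c).toFinset).card <
      ((((c :: rest) ++ pAllP d)).toFinset \ vis.toFinset).card := by
  apply Finset.card_lt_card
  rw [Finset.ssubset_def]
  refine ⟨pvB_diff_subset d c rest ext vis hext, ?_⟩
  intro hsub
  have hcmem : c ∈ (((c :: rest) ++ pAllP d).toFinset \ vis.toFinset) := by
    simp [Finset.mem_sdiff, List.mem_toFinset, hc]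
  have := hsub hcmem
  simp [Finset.mem_sdiff, List.mem_toFinset, PySem.Set.mem_add] at this

-- B's loop: model the Python stack with its top at the head, so 'stack.extend(reversed(parents))'
-- followed by 'stack.pop()'s is 'ps ++ rest'; 'anc_set.update(parents)' is PySem.Set.update.
def pvGoB (d : List (String × Option (List String))) : List String → List String → List String → List String
  | [], _, anc => anc
  | c :: rest, vis, anc =>
    if hcv : PySem.Set.contains vis c then pvGoB d rest vis anc
    else
      match hdc : dget d c with
      | some (some ps) => pvGoB d (ps ++ rest) (PySem.Set.add vis c) (PySem.Set.update anc ps)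
      | _ => pvGoB d rest (PySem.Set.add vis c) anc
  termination_by stack vis _ =>
    ((pAllP d).length + 2) * ((stack ++ pAllP d).toFinset \ vis.toFinset).card + stack.length
  decreasing_by
  · have hc : c ∈ vis := (PySem.Set.contains_iff vis c).mp hcv
    rw [pvB_diff_eq d c rest vis hc]
    simp only [List.length_cons]
    omega
  · have hc : c ∉ vis := fun h => hcv ((PySem.Set.contains_iff vis c).mpr h)
    have hps : ∀ e ∈ ps, e ∈ pAllP d :=
      pv_mem_pAllP d c ps (pv_dget_mem d c (some ps) hdc)
    have hlen : ps.length ≤ (pAllP d).length :=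
      pv_listlen_le d c ps (pv_dget_mem d c (some ps) hdc)
    have hcard := pvB_card_lt d c rest ps vis hc hps
    set K := (pAllP d).length + 2 with hK
    set cN := (((ps ++ rest) ++ pAllP d).toFinset \ (PySem.Set.add vis c).toFinset).card with hcN
    set cO := (((c :: rest) ++ pAllP d).toFinset \ vis.toFinset).card with hcO
    have hmul : K * cN + K ≤ K * cO := by
      have h1 : K * (cN + 1) ≤ K * cO := Nat.mul_le_mul_left K (by omega)
      calc K * cN + K = K * (cN + 1) := by ring
        _ ≤ K * cO := h1
    simp only [List.length_append, List.length_cons]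
    generalize K * cN = A at hmul ⊢
    generalize K * cO = B at hmul ⊢
    omega
  · have hc : c ∉ vis := fun h => hcv ((PySem.Set.contains_iff vis c).mpr h)
    have hcard := pvB_card_lt d c rest [] vis hc (by simp)
    simp only [List.nil_append] at hcard
    set K := (pAllP d).length + 2 with hK
    set cN := ((rest ++ pAllP d).toFinset \ (PySem.Set.add vis c).toFinset).card with hcN
    set cO := (((c :: rest) ++ pAllP d).toFinset \ vis.toFinset).card with hcO
    have hmul : K * cN ≤ K * cO := Nat.mul_le_mul_left K (by omega)
    simp only [List.length_cons]
    generalize K * cN = A at hmul ⊢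
    generalize K * cO = B at hmul ⊢
    omega

def get_anchestors_alt (inst : String) (mro : List (String × Option (List String))) (anc_set : List String) : List String :=
  pvGoB mro [inst] PySem.Set.empty anc_set

-- ===== PRECONDITION & SPEC =====
-- parent list of x (empty when x is missing or maps to None)
def padd (d : List (String × Option (List String))) (x : String) : List String :=
  match dget d x with | some (some ps) => ps | _ => []

-- one step of graph closure along the edge map e
def pstep (e : String → List String) (S : Finset String) : Finset String :=
  S ∪ S.biUnion (fun x => (e x).toFinset)

-- everything reachable from x along e (pvFuel d iterations always reach the fixed point)
def pclosure (d : List (String × Option (List String))) (e : String → List String) (x : String) : Finset String :=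
  (pstep e)^[pvFuel d] {x}

-- Pre_ excludes (a) tables whose part reachable from inst lists a parent class with no entry in mro:
-- such a table is incomplete, and on it A stops expanding the remaining siblings at the KeyError
-- while B skips the unknown name — neither behaviour is specified for an incomplete table; and
-- (b) tables with a cycle reachable from inst, on which A's unmemoized recursion exceeds the
-- recursion limit (RecursionError) once no missing name cuts the exploration first.
def Pre_get_anchestors (inst : String) (mro : List (String × Option (List String))) (anc_set : List String) : Prop :=
  ∀ x ∈ pclosure mro (padd mro) inst, ∀ p ∈ padd mro x,
    x ∉ pclosure mro (padd mro) p ∧ (dget mro p).isSome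

instance (inst : String) (mro : List (String × Option (List String))) (anc_set : List String) :
    Decidable (Pre_get_anchestors inst mro anc_set) := by unfold Pre_get_anchestors; infer_instance

def pvWitness_get_anchestors : String × (List (String × Option (List String))) × List String :=
  ("B", [("B", some ["A"]), ("A", none)], [])

def Spec_get_anchestors (inst : String) (mro : List (String × Option (List String))) (anc_set : List String) (out : List String) : Prop := out = get_anchestors_alt inst mro anc_set
instance (inst : String) (mro : List (String × Option (List String))) (anc_set : List String) (out : List String) : Decidable (Spec_get_anchestors inst mro anc_set out) := by unfold Spec_get_anchestors; infer_instance

-- ===== CLAIM =====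
def Claim_equal_get_anchestors : Prop := ∀ (inst : String) (mro : List (String × Option (List String))) (anc_set : List String), Dom_get_anchestors inst mro anc_set → Pre_get_anchestors inst mro anc_set → Spec_get_anchestors inst mro anc_set (get_anchestors inst mro anc_set)

-- ===== LEMMAS AND PROOFS =====

-- ---- small set/list facts ----
theorem pv_mem_foldlAdd (ps : List String) (s : List String) (e : String) :
    e ∈ ps.foldl PySem.Set.add s ↔ e ∈ s ∨ e ∈ ps := by
  induction ps generalizing s with
  | nil => simp
  | cons p t ih =>
      simp only [List.foldl_cons, ih, PySem.Set.mem_add, List.mem_cons]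
      tauto

theorem pv_foldl_const_of_fix {β : Type} (g : List String → List String) (s : List String)
    (h : g s = s) (l : List β) : l.foldl (fun a _ => g a) s = s := by
  induction l with
  | nil => rfl
  | cons v t ih => simpa [List.foldl_cons, h] using ih

-- ---- B-loop unfolding equations ----
theorem pvGoB_nil (d : List (String × Option (List String))) (vis anc : List String) :
    pvGoB d [] vis anc = anc := by rw [pvGoB]

theorem pvGoB_cons_mem (d : List (String × Option (List String))) (c : String)
    (rest vis anc : List String) (h : c ∈ vis) :
    pvGoB d (c :: rest) vis anc = pvGoB d rest vis anc := by
  rw [pvGoB]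
  rw [dif_pos ((PySem.Set.contains_iff vis c).mpr h)]

theorem pvGoB_cons_new_list (d : List (String × Option (List String))) (c : String)
    (rest vis anc ps : List String) (h : c ∉ vis) (hd : dget d c = some (some ps)) :
    pvGoB d (c :: rest) vis anc =
      pvGoB d (ps ++ rest) (PySem.Set.add vis c) (PySem.Set.update anc ps) := by
  rw [pvGoB]
  rw [dif_neg (fun hcv => h ((PySem.Set.contains_iff vis c).mp hcv))]
  split
  · rename_i ps' heq
    rw [hd] at heq
    cases heq
    rfl
  · rename_i hne
    exact absurd hd (by simpa using hne ps)

theorem pvGoB_cons_new_other (d : List (String × Option (List String))) (c : String)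
    (rest vis anc : List String) (h : c ∉ vis)
    (hd : dget d c = none ∨ dget d c = some none) :
    pvGoB d (c :: rest) vis anc = pvGoB d rest (PySem.Set.add vis c) anc := by
  rw [pvGoB]
  rw [dif_neg (fun hcv => h ((PySem.Set.contains_iff vis c).mp hcv))]
  split
  · rename_i ps' heq
    rcases hd with hd | hd <;> rw [hd] at heq <;> cases heq
  · rfl

-- ---- padd / pAllP ----
theorem pv_padd_sub_allP (d : List (String × Option (List String))) (y j : String)
    (h : j ∈ padd d y) : j ∈ pAllP d := by
  unfold padd at h
  rcases hy : dget d y with _ | v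
  · rw [hy] at h; simp at h
  · rcases v with _ | ps
    · rw [hy] at h; simp at h
    · rw [hy] at h
      exact pv_mem_pAllP d y ps (pv_dget_mem d y (some ps) hy) j h

theorem pv_allP_len (d : List (String × Option (List String))) : (pAllP d).length ≤ pvSize d := by
  induction d with
  | nil => simp [pAllP, pvSize]
  | cons p t ih =>
      rcases p with ⟨a, b⟩
      rcases b with _ | l
      · have h1 : pAllP ((a, none) :: t) = pAllP t := rfl
        have h2 : pvSize ((a, none) :: t) = (1 + 0) + pvSize t := rfl
        rw [h1, h2]; omega
      · have h1 : pAllP ((a, some l) :: t) = l ++ pAllP t := rfl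
        have h2 : pvSize ((a, some l) :: t) = (1 + l.length) + pvSize t := rfl
        rw [h1, h2, List.length_append]; omega

-- ---- closure machinery ----
theorem pv_pstep_subset (e : String → List String) (S : Finset String) : S ⊆ pstep e S :=
  Finset.subset_union_left

theorem pv_mem_closure_self (d : List (String × Option (List String))) (e : String → List String)
    (x : String) : x ∈ pclosure d e x := by
  unfold pclosure
  have : ∀ n, x ∈ (pstep e)^[n] {x} := by
    intro n
    induction n with
    | zero => simp
    | succ n ih => rw [Function.iterate_succ_apply']; exact pv_pstep_subset e _ ih
  exact this _

theorem pv_closure_in_U (d : List (String × Option (List String))) (e : String → List String)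
    (hU : ∀ y, ∀ j ∈ e y, j ∈ pAllP d) (x : String) :
    pclosure d e x ⊆ insert x (pAllP d).toFinset := by
  unfold pclosure
  have : ∀ n, (pstep e)^[n] {x} ⊆ insert x (pAllP d).toFinset := by
    intro n
    induction n with
    | zero => simp
    | succ n ih =>
        rw [Function.iterate_succ_apply']
        intro z hz
        rcases Finset.mem_union.mp hz with h1 | h2
        · exact ih h1
        · rcases Finset.mem_biUnion.mp h2 with ⟨y, _, hzy⟩
          exact Finset.mem_insert_of_mem (List.mem_toFinset.mpr (hU y z (List.mem_toFinset.mp hzy)))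
  exact this _

theorem pv_card_U_le (d : List (String × Option (List String))) (x : String) :
    (insert x (pAllP d).toFinset).card ≤ pvFuel d := by
  calc (insert x (pAllP d).toFinset).card ≤ (pAllP d).toFinset.card + 1 := Finset.card_insert_le _ _
    _ ≤ (pAllP d).length + 1 := by have := (pAllP d).toFinset_card_le; omega
    _ ≤ pvFuel d := by have := pv_allP_len d; unfold pvFuel; omega

theorem pv_closure_fixed (d : List (String × Option (List String))) (e : String → List String)
    (hU : ∀ y, ∀ j ∈ e y, j ∈ pAllP d) (x : String) :
    pstep e (pclosure d e x) = pclosure d e x := by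
  have key : ∀ k, pstep e ((pstep e)^[k] {x}) = (pstep e)^[k] {x} ∨ k + 1 ≤ ((pstep e)^[k] {x}).card := by
    intro k
    induction k with
    | zero => right; simp
    | succ k ih =>
        rcases ih with h | h
        · left; rw [Function.iterate_succ_apply', h, h]
        · by_cases hfix : pstep e ((pstep e)^[k] {x}) = (pstep e)^[k] {x}
          · left; rw [Function.iterate_succ_apply', hfix, hfix]
          · right
            rw [Function.iterate_succ_apply']
            have hss : (pstep e)^[k] {x} ⊂ pstep e ((pstep e)^[k] {x}) :=
              ssubset_of_ne_of_subset (fun hh => hfix hh.symm) (pv_pstep_subset e _)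
            have := Finset.card_lt_card hss
            omega
  rcases key (pvFuel d) with h | h
  · exact h
  · exfalso
    have h2 : ((pstep e)^[pvFuel d] {x}).card ≤ pvFuel d :=
      le_trans (Finset.card_le_card (pv_closure_in_U d e hU x)) (pv_card_U_le d x)
    omega

theorem pv_closure_closed (d : List (String × Option (List String))) (e : String → List String)
    (hU : ∀ y, ∀ j ∈ e y, j ∈ pAllP d) (x y : String) (hy : y ∈ pclosure d e x) :
    ∀ j ∈ e y, j ∈ pclosure d e x := by
  intro j hj
  rw [← pv_closure_fixed d e hU x]
  exact Finset.mem_union_right _ (Finset.mem_biUnion.mpr ⟨y, hy, List.mem_toFinset.mpr hj⟩)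

theorem pv_closure_min (d : List (String × Option (List String))) (e : String → List String)
    (x : String) (T : Finset String) (hx : x ∈ T) (hT : ∀ y ∈ T, ∀ j ∈ e y, j ∈ T) :
    pclosure d e x ⊆ T := by
  unfold pclosure
  have : ∀ n, (pstep e)^[n] {x} ⊆ T := by
    intro n
    induction n with
    | zero => simpa using hx
    | succ n ih =>
        rw [Function.iterate_succ_apply']
        intro z hz
        rcases Finset.mem_union.mp hz with h1 | h2
        · exact ih h1
        · rcases Finset.mem_biUnion.mp h2 with ⟨y, hy, hzy⟩
          exact hT y (ih hy) z (List.mem_toFinset.mp hzy)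
  exact this _

theorem pv_closure_edge (d : List (String × Option (List String))) (e : String → List String)
    (hU : ∀ y, ∀ j ∈ e y, j ∈ pAllP d) (x j : String) (hj : j ∈ e x) :
    pclosure d e j ⊆ pclosure d e x :=
  pv_closure_min d e j (pclosure d e x)
    (pv_closure_closed d e hU x x (pv_mem_closure_self d e x) j hj)
    (fun y hy => pv_closure_closed d e hU x y hy)

-- ---- reachability along parent edges ----
inductive pvReach (d : List (String × Option (List String))) : String → String → Prop
  | refl (x : String) : pvReach d x x
  | step {x i y : String} : i ∈ padd d x → pvReach d i y → pvReach d x y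

theorem pv_reach_to_closure (d : List (String × Option (List String))) (i y : String)
    (h : pvReach d i y) : y ∈ pclosure d (padd d) i := by
  induction h with
  | refl x => exact pv_mem_closure_self d (padd d) x
  | step hij _ ih =>
      exact pv_closure_edge d (padd d) (fun y2 => pv_padd_sub_allP d y2) _ _ hij ih

-- "everything that exploring x can ever add is already in s"
def pvDone (d : List (String × Option (List String))) (s : List String) (x : String) : Prop :=
  ∀ z e, pvReach d x z → e ∈ padd d z → e ∈ s

theorem pv_done_mono (d : List (String × Option (List String))) (s s' : List String) (x : String)
    (h : ∀ e ∈ s, e ∈ s') (hd : pvDone d s x) : pvDone d s' x :=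
  fun z e hr hp => h e (hd z e hr hp)

theorem pv_done_child (d : List (String × Option (List String))) (s : List String) (x i : String)
    (hd : pvDone d s x) (hi : i ∈ padd d x) : pvDone d s i :=
  fun z e hr hp => hd z e (.step hi hr) hp

theorem pv_done_of_padd_nil (d : List (String × Option (List String))) (s : List String) (x : String)
    (h : padd d x = []) : pvDone d s x := by
  intro z e hr hp
  cases hr with
  | refl => rw [h] at hp; simp at hp
  | step hi _ => rw [h] at hi; simp at hi

-- ---- A adds nothing when everything it could add is already present ----
theorem pv_foldlAdd_of_subset (ps : List String) (s : List String) (h : ∀ e ∈ ps, e ∈ s) :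
    ps.foldl PySem.Set.add s = s := by
  induction ps with
  | nil => rfl
  | cons p t ih =>
      simp only [List.foldl_cons]
      rw [PySem.Set.add_of_mem (h p (by simp))]
      exact ih (fun e he => h e (by simp [he]))

theorem pv_loopA_noop (d : List (String × Option (List String))) (f : Nat)
    (Hrec : ∀ i s, pvDone d s i → pvGoA d f i s = s) :
    ∀ l s, (∀ i ∈ l, pvDone d s i) → pvLoopA d (pvGoA d f) l s = s := by
  intro l
  induction l with
  | nil => intro s _; rfl
  | cons i rest ih =>
      intro s hc
      rcases hdi : dget d i with _ | v
      · simp [pvLoopA, hdi]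
      · rcases v with _ | vs
        · simp only [pvLoopA, hdi]
          exact ih s (fun j hj => hc j (by simp [hj]))
        · simp only [pvLoopA, hdi]
          rw [pv_foldl_const_of_fix _ s (Hrec i s (hc i (by simp))) vs]
          exact ih s (fun j hj => hc j (by simp [hj]))

theorem pv_goA_noop (d : List (String × Option (List String))) :
    ∀ f x s, pvDone d s x → pvGoA d f x s = s := by
  intro f
  induction f with
  | zero => intro x s _; rfl
  | succ f ih =>
      intro x s hd
      rcases hdx : dget d x with _ | v
      · simp [pvGoA, hdx]
      · rcases v with _ | ps
        · simp [pvGoA, hdx]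
        · have hps : padd d x = ps := by simp [padd, hdx]
          have hsub : ∀ e ∈ ps, e ∈ s := fun e he => hd x e (.refl x) (by rw [hps]; exact he)
          simp only [pvGoA, hdx]
          rw [pv_foldlAdd_of_subset ps s hsub]
          exact pv_loopA_noop d f ih ps s
            (fun i hi => pv_done_child d s x i hd (by rw [hps]; exact hi))

theorem pv_goA_somenone (d : List (String × Option (List String))) (f : Nat) (i : String)
    (s : List String) (h : dget d i = some none) : pvGoA d f i s = s := by
  cases f with
  | zero => rfl
  | succ f => simp [pvGoA, h]

theorem pv_goA_emptylist (d : List (String × Option (List String))) (f : Nat) (i : String)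
    (s : List String) (h : dget d i = some (some [])) : pvGoA d f i s = s := by
  cases f with
  | zero => rfl
  | succ f => simp [pvGoA, h, pvLoopA]

-- ---- rank: number of classes reachable along parent lists ----
def pvRank (d : List (String × Option (List String))) (x : String) : Nat :=
  (pclosure d (padd d) x).card

theorem pv_rank_pos (d : List (String × Option (List String))) (x : String) : 1 ≤ pvRank d x :=
  Finset.card_pos.mpr ⟨x, pv_mem_closure_self d (padd d) x⟩

theorem pv_rank_lt (d : List (String × Option (List String))) (x i : String)
    (hi : i ∈ padd d x) (hnc : x ∉ pclosure d (padd d) i) : pvRank d i < pvRank d x := by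
  have hsub : pclosure d (padd d) i ⊆ pclosure d (padd d) x :=
    pv_closure_edge d (padd d) (fun y => pv_padd_sub_allP d y) x i hi
  exact Finset.card_lt_card ⟨hsub, fun h2 => hnc (h2 (pv_mem_closure_self d (padd d) x))⟩

theorem pv_rank_le_fuel (d : List (String × Option (List String))) (x : String) :
    pvRank d x ≤ pvFuel d :=
  le_trans (Finset.card_le_card (pv_closure_in_U d (padd d) (fun y => pv_padd_sub_allP d y) x))
    (pv_card_U_le d x)

-- ---- the sibling loop: B's stack processes l before rest; A's loop over l ----
theorem pv_loop (d : List (String × Option (List String))) (inst0 : String)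
    (hpre : ∀ x ∈ pclosure d (padd d) inst0, ∀ p ∈ padd d x,
      x ∉ pclosure d (padd d) p ∧ (dget d p).isSome)
    (x : String) (ps : List String) (hxc : x ∈ pclosure d (padd d) inst0)
    (hx : dget d x = some (some ps)) (f' : Nat)
    (IH : ∀ i, i ∈ ps → ∀ rest vis s, (∀ y ∈ vis, pvDone d s y ∨ ¬ pvReach d i y) →
      ∃ vis', pvGoB d (i :: rest) vis s = pvGoB d rest vis' (pvGoA d f' i s) ∧
        (∀ y ∈ vis, y ∈ vis') ∧ (∀ e ∈ s, e ∈ pvGoA d f' i s) ∧ pvDone d (pvGoA d f' i s) i ∧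
        (∀ y ∈ vis', pvDone d (pvGoA d f' i s) y ∨ y ∈ vis)) :
    ∀ (l : List String), (∀ i ∈ l, i ∈ ps) → ∀ (rest vis0 vis s : List String),
      (∀ y ∈ vis, pvDone d s y ∨ (y ∈ vis0 ∧ ¬ pvReach d x y) ∨ y = x) →
      ∃ vis', pvGoB d (l ++ rest) vis s = pvGoB d rest vis' (pvLoopA d (pvGoA d f') l s) ∧
        (∀ y ∈ vis, y ∈ vis') ∧ (∀ e ∈ s, e ∈ pvLoopA d (pvGoA d f') l s) ∧
        (∀ y ∈ vis', pvDone d (pvLoopA d (pvGoA d f') l s) y ∨ (y ∈ vis0 ∧ ¬ pvReach d x y) ∨ y = x) ∧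
        (∀ i ∈ l, pvDone d (pvLoopA d (pvGoA d f') l s) i) := by
  have hpadd : padd d x = ps := by simp [padd, hx]
  intro l
  induction l with
  | nil =>
      intro _ rest vis0 vis s hJ
      exact ⟨vis, rfl, fun _ h => h, fun _ h => h, hJ, by simp⟩
  | cons i r ihl =>
      intro hmem rest vis0 vis s hJ
      have hips : i ∈ ps := hmem i (by simp)
      have hipadd : i ∈ padd d x := by rw [hpadd]; exact hips
      have hxnc : x ∉ pclosure d (padd d) i := (hpre x hxc i hipadd).1
      have hiSome : (dget d i).isSome := (hpre x hxc i hipadd).2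
      have hnotix : ¬ pvReach d i x := fun hr => hxnc (pv_reach_to_closure d i x hr)
      have Ji : ∀ y ∈ vis, pvDone d s y ∨ ¬ pvReach d i y := by
        intro y hy
        rcases hJ y hy with h | ⟨_, hnr⟩ | hyx
        · exact Or.inl h
        · exact Or.inr (fun hr => hnr (.step hipadd hr))
        · exact Or.inr (by rw [hyx]; exact hnotix)
      obtain ⟨vis2, hB2, hvm2, hsm2, hdone2, hJ2⟩ := IH i hips (r ++ rest) vis s Ji
      -- A's next state equals pvGoA f' i s in every case dget d i can take
      have hAstep : pvLoopA d (pvGoA d f') (i :: r) s = pvLoopA d (pvGoA d f') r (pvGoA d f' i s) := by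
        rcases hdi : dget d i with _ | v
        · rw [hdi] at hiSome; simp at hiSome
        · rcases v with _ | vs
          · simp only [pvLoopA, hdi]
            rw [pv_goA_somenone d f' i s hdi]
          · simp only [pvLoopA, hdi]
            cases vs with
            | nil =>
                rw [pv_goA_emptylist d f' i s hdi]
                rfl
            | cons v vs' =>
                congr 1
                simp only [List.foldl_cons]
                exact pv_foldl_const_of_fix (pvGoA d f' i) (pvGoA d f' i s)
                  (pv_goA_noop d f' i (pvGoA d f' i s) hdone2) vs'
      have hJ2' : ∀ y ∈ vis2, pvDone d (pvGoA d f' i s) y ∨ (y ∈ vis0 ∧ ¬ pvReach d x y) ∨ y = x := by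
        intro y hy
        rcases hJ2 y hy with h | hold
        · exact Or.inl h
        · rcases hJ y hold with h | h | h
          · exact Or.inl (pv_done_mono d s _ y hsm2 h)
          · exact Or.inr (Or.inl h)
          · exact Or.inr (Or.inr h)
      obtain ⟨vis3, hB3, hvm3, hsm3, hJ3, hdonel3⟩ :=
        ihl (fun j hj => hmem j (by simp [hj])) rest vis0 vis2 (pvGoA d f' i s) hJ2'
      refine ⟨vis3, ?_, ?_, ?_, ?_, ?_⟩
      · show pvGoB d (i :: (r ++ rest)) vis s = _
        rw [hB2, hB3, hAstep]
      · exact fun y hy => hvm3 y (hvm2 y hy)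
      · intro e he
        rw [hAstep]
        exact hsm3 e (hsm2 e he)
      · rw [hAstep]; exact hJ3
      · intro j hj
        rw [hAstep]
        rcases List.mem_cons.mp hj with h | h
        · rw [h]
          exact pv_done_mono d (pvGoA d f' i s) _ i hsm3 hdone2
        · exact hdonel3 j h

-- ---- the main simulation: B's stack visit of x equals A's recursion on x ----
theorem pv_main (d : List (String × Option (List String))) (inst0 : String)
    (hpre : ∀ x ∈ pclosure d (padd d) inst0, ∀ p ∈ padd d x,
      x ∉ pclosure d (padd d) p ∧ (dget d p).isSome) :
    ∀ n x, pvRank d x ≤ n → x ∈ pclosure d (padd d) inst0 → ∀ f, pvRank d x ≤ f →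
    ∀ rest vis s, (∀ y ∈ vis, pvDone d s y ∨ ¬ pvReach d x y) →
    ∃ vis', pvGoB d (x :: rest) vis s = pvGoB d rest vis' (pvGoA d f x s) ∧
      (∀ y ∈ vis, y ∈ vis') ∧ (∀ e ∈ s, e ∈ pvGoA d f x s) ∧ pvDone d (pvGoA d f x s) x ∧
      (∀ y ∈ vis', pvDone d (pvGoA d f x s) y ∨ y ∈ vis) := by
  intro n
  induction n using Nat.strong_induction_on with
  | _ n IHn =>
  intro x hn hxc f hf rest vis s hJ
  have hpos := pv_rank_pos d x
  obtain ⟨f', rfl⟩ : ∃ f', f = f' + 1 := ⟨f - 1, by omega⟩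
  by_cases hx : x ∈ vis
  · have hdone : pvDone d s x := by
      rcases hJ x hx with h | h
      · exact h
      · exact absurd (.refl x) h
    have hA : pvGoA d (f' + 1) x s = s := pv_goA_noop d (f' + 1) x s hdone
    refine ⟨vis, ?_, fun _ h => h, ?_, ?_, ?_⟩
    · rw [pvGoB_cons_mem d x rest vis s hx, hA]
    · rw [hA]; exact fun _ h => h
    · rw [hA]; exact hdone
    · rw [hA]; exact fun y hy => Or.inr hy
  · rcases hdx : dget d x with _ | v
    · have hA : pvGoA d (f' + 1) x s = s := by simp [pvGoA, hdx]
      have hdone : pvDone d s x := pv_done_of_padd_nil d s x (by simp [padd, hdx])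
      refine ⟨PySem.Set.add vis x, ?_, ?_, ?_, ?_, ?_⟩
      · rw [pvGoB_cons_new_other d x rest vis s hx (Or.inl hdx), hA]
      · intro y hy; exact (PySem.Set.mem_add vis x y).mpr (Or.inl hy)
      · rw [hA]; exact fun _ h => h
      · rw [hA]; exact hdone
      · rw [hA]
        intro y hy
        rcases (PySem.Set.mem_add vis x y).mp hy with h | h
        · exact Or.inr h
        · exact Or.inl (by rw [h]; exact hdone)
    · rcases v with _ | ps
      · have hA : pvGoA d (f' + 1) x s = s := by simp [pvGoA, hdx]
        have hdone : pvDone d s x := pv_done_of_padd_nil d s x (by simp [padd, hdx])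
        refine ⟨PySem.Set.add vis x, ?_, ?_, ?_, ?_, ?_⟩
        · rw [pvGoB_cons_new_other d x rest vis s hx (Or.inr hdx), hA]
        · intro y hy; exact (PySem.Set.mem_add vis x y).mpr (Or.inl hy)
        · rw [hA]; exact fun _ h => h
        · rw [hA]; exact hdone
        · rw [hA]
          intro y hy
          rcases (PySem.Set.mem_add vis x y).mp hy with h | h
          · exact Or.inr h
          · exact Or.inl (by rw [h]; exact hdone)
      · have hpadd : padd d x = ps := by simp [padd, hdx]
        have hU : ∀ y, ∀ j ∈ padd d y, j ∈ pAllP d := fun y => pv_padd_sub_allP d y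
        have hIH : ∀ i, i ∈ ps → ∀ rest1 vis1 s1,
            (∀ y ∈ vis1, pvDone d s1 y ∨ ¬ pvReach d i y) →
            ∃ vis', pvGoB d (i :: rest1) vis1 s1 = pvGoB d rest1 vis' (pvGoA d f' i s1) ∧
              (∀ y ∈ vis1, y ∈ vis') ∧ (∀ e ∈ s1, e ∈ pvGoA d f' i s1) ∧
              pvDone d (pvGoA d f' i s1) i ∧
              (∀ y ∈ vis', pvDone d (pvGoA d f' i s1) y ∨ y ∈ vis1) := by
          intro i hi rest1 vis1 s1 hinv
          have hipadd : i ∈ padd d x := by rw [hpadd]; exact hi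
          have hlt : pvRank d i < pvRank d x :=
            pv_rank_lt d x i hipadd (hpre x hxc i hipadd).1
          have hic : i ∈ pclosure d (padd d) inst0 :=
            pv_closure_closed d (padd d) hU inst0 x hxc i hipadd
          exact IHn (pvRank d i) (by omega) i le_rfl hic f' (by omega) rest1 vis1 s1 hinv
        set s1 := ps.foldl PySem.Set.add s with hs1
        have hJ1 : ∀ y ∈ PySem.Set.add vis x,
            pvDone d s1 y ∨ (y ∈ vis ∧ ¬ pvReach d x y) ∨ y = x := by
          intro y hy
          rcases (PySem.Set.mem_add vis x y).mp hy with h | h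
          · rcases hJ y h with hd | hnr
            · exact Or.inl (pv_done_mono d s s1 y
                (fun e he => (pv_mem_foldlAdd ps s e).mpr (Or.inl he)) hd)
            · exact Or.inr (Or.inl ⟨h, hnr⟩)
          · exact Or.inr (Or.inr h)
        obtain ⟨vis2, hB, hvm, hsm, hJ2, hdonel⟩ :=
          pv_loop d inst0 hpre x ps hxc hdx f' hIH ps (fun _ h => h) rest vis
            (PySem.Set.add vis x) s1 hJ1
        have hAeq : pvGoA d (f' + 1) x s = pvLoopA d (pvGoA d f') ps s1 := by
          simp [pvGoA, hdx, hs1]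
        have hdone : pvDone d (pvLoopA d (pvGoA d f') ps s1) x := by
          intro z e hr hp
          cases hr with
          | refl =>
              rw [hpadd] at hp
              exact hsm e ((pv_mem_foldlAdd ps s e).mpr (Or.inr hp))
          | step hi hr' =>
              rw [hpadd] at hi
              exact hdonel _ hi z e hr' hp
        refine ⟨vis2, ?_, ?_, ?_, ?_, ?_⟩
        · rw [pvGoB_cons_new_list d x rest vis s ps hx hdx, hAeq]
          have : PySem.Set.update s ps = s1 := by
            simp [PySem.Set.update, hs1]
          rw [this]
          exact hB
        · exact fun y hy => hvm y ((PySem.Set.mem_add vis x y).mpr (Or.inl hy))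
        · rw [hAeq]
          exact fun e he => hsm e ((pv_mem_foldlAdd ps s e).mpr (Or.inl he))
        · rw [hAeq]; exact hdone
        · rw [hAeq]
          intro y hy
          rcases hJ2 y hy with h | ⟨h, _⟩ | h
          · exact Or.inl h
          · exact Or.inr h
          · subst h; exact Or.inl hdone

-- ===== VERDICT (by name: the statement is the Claim_ definition above) =====
theorem get_anchestors_spec : Claim_equal_get_anchestors := by
  unfold Claim_equal_get_anchestors
  intro inst mro anc_set _ hpre
  unfold Spec_get_anchestors get_anchestors get_anchestors_alt
  unfold Pre_get_anchestors at hpre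
  obtain ⟨vis', hB, -⟩ :=
    pv_main mro inst hpre (pvRank mro inst) inst le_rfl
      (pv_mem_closure_self mro (padd mro) inst) (pvFuel mro) (pv_rank_le_fuel mro inst)
      [] PySem.Set.empty anc_set (by intro y hy; simp [PySem.Set.empty] at hy)
  rw [hB, pvGoB_nil]
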